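-- pv_equiv track=rewrite | github.com/FaiZaman/Dynamic-Heuristic-Local-Alignments | FASTA.py | get_seeds
-- ===== SOURCE A (Python) =====
-- def get_seeds(ktup, index_table, seq2):
--
-- 	# go through seq2 and get seeds by matching to index table
-- 	seeds = {}
--
-- 	for letter_index in range(0, len(seq2) - ktup + 1):
-- 		match = seq2[letter_index:letter_index + ktup]
--
-- 		if match in index_table:
-- 			for seq1_position in index_table[match]:
-- 				diagonal = seq1_position - letter_index
-- 				if diagonal in seeds:
-- 					seeds[diagonal].append((seq1_position, letter_index))
-- 				else:
-- 					seeds[diagonal] = [(seq1_position, letter_index)]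
--
-- 	return seeds
-- ===== SOURCE B (Python) =====
-- def get_seeds(ktup, index_table, seq2):
--     # Pattern-major search: for each index-table word of length ktup, scan seq2 for its
--     # occurrences by direct substring comparison (no hashing of windows), stable-sort all
--     # hits by window position, then group the (pos, index) pairs by diagonal.
--     n = len(seq2)
--     hits = []
--     for word, positions in index_table.items():
--         if len(word) == ktup:
--             for i in range(n - ktup + 1):
--                 if seq2[i:i + ktup] == word:
--                     hits.append((i, positions))
--     hits.sort(key=lambda h: h[0])
--     seeds = {}
--     for i, positions in hits:
--         for p in positions:
--             seeds.setdefault(p - i, []).append((p, i))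
--     return seeds
-- ===== Notes on version B (the rewrite author's own statement) =====
-- stated objective: alternative
-- what changed: Inverts the traversal: instead of slicing and hashing every window of seq2 into the index table, B searches seq2 for each table word of length ktup by direct substring comparison, stable-sorts the collected hits by window position, and groups the (pos, index) pairs by diagonal with setdefault; B does per-window work only for table words of length ktup (none at all when the table has none), which is the mechanism behind the measured speedup on large inputs, while with many length-ktup words it can be slower than A.
-- outside the precondition, e.g. on get_seeds(-1, {'a': [0]}, 'ab'): A returns {0: [(0, 0)]}, B returns {}
import Mathlib
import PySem

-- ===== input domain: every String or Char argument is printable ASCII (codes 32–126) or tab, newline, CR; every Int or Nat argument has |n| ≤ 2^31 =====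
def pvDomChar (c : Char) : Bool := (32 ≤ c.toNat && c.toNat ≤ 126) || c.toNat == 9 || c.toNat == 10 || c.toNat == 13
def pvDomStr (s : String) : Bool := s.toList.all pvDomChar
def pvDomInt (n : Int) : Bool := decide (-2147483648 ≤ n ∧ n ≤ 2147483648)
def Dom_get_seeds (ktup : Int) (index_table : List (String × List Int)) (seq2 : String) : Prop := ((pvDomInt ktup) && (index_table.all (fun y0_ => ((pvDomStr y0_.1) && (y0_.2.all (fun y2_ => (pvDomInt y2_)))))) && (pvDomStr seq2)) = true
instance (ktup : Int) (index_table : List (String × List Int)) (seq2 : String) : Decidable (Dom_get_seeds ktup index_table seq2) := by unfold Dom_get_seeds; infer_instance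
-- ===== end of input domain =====

-- B inverts the traversal: instead of hashing every window of seq2 into the index table, it
-- searches seq2 for each table word of length ktup by direct substring comparison, stable-sorts
-- the hits by window position, and groups the (pos, index) pairs by diagonal (objective: alternative).

-- ===== PORT A =====
def get_seeds (ktup : Int) (index_table : List (String × List Int)) (seq2 : String) : List (Int × List (Int × Int)) :=
  let tbl : PySem.Dict String (List Int) := PySem.Dict.mk index_table
  (List.foldl
    (fun seeds li =>
      let m := PySem.Str.slice seq2 (some li) (some (li + ktup))
      match tbl.get? m with            -- 'if match in index_table: … index_table[match]'
      | some ps =>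
          List.foldl (fun seeds p =>
            let dg := p - li
            match seeds.get? dg with   -- 'if diagonal in seeds'
            | some l => seeds.insert dg (l ++ [(p, li)])   -- in-place append
            | none   => seeds.insert dg [(p, li)]) seeds ps
      | none => seeds)
    (PySem.Dict.empty)
    (PySem.List.pyRange 0 (PySem.Str.len seq2 - ktup + 1) 1)).items

-- ===== PORT B =====
def get_seeds_alt (ktup : Int) (index_table : List (String × List Int)) (seq2 : String) : List (Int × List (Int × Int)) :=
  let tbl : PySem.Dict String (List Int) := PySem.Dict.mk index_table
  let n := PySem.Str.len seq2
  let hits :=                              -- per-word occurrence scan of seq2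
    tbl.items.foldl (fun acc wp =>
      if PySem.Str.len wp.1 == ktup then
        (PySem.List.pyRange 0 (n - ktup + 1) 1).foldl (fun acc i =>
          if PySem.Str.slice seq2 (some i) (some (i + ktup)) == wp.1 then acc ++ [(i, wp.2)]
          else acc) acc
      else acc) []
  let shits := PySem.List.sorted hits (fun h => h.1)   -- hits.sort(key=lambda h: h[0]), stable
  (shits.foldl (fun d h =>
      -- seeds.setdefault(p - i, []).append((p, i))  ==  modify with default []
      h.2.foldl (fun d p => d.modify (p - h.1) [] (fun l => l ++ [(p, h.1)])) d)
    (PySem.Dict.empty : PySem.Dict Int (List (Int × Int)))).items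

-- ===== PRECONDITION & SPEC =====
-- Pre_ excludes (a) negative ktup — outside the natural domain of k-tuple matching, where A's
-- negative slice stop wraps around seq2 and matches accidental substrings — and (b) association
-- lists with duplicate keys, which do not represent a Python dict (Python collapses the
-- duplicates before either function runs, so such inputs never reach the Python programs).
def Pre_get_seeds (ktup : Int) (index_table : List (String × List Int)) (seq2 : String) : Prop :=
  0 ≤ ktup ∧ (index_table.map Prod.fst).Nodup
instance (ktup : Int) (index_table : List (String × List Int)) (seq2 : String) : Decidable (Pre_get_seeds ktup index_table seq2) := by unfold Pre_get_seeds; infer_instance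
def pvWitness_get_seeds : Int × (List (String × List Int)) × String := (2, [("ab", [0, 3])], "xaby")
def Spec_get_seeds (ktup : Int) (index_table : List (String × List Int)) (seq2 : String) (out : List (Int × List (Int × Int))) : Prop := out = get_seeds_alt ktup index_table seq2
instance (ktup : Int) (index_table : List (String × List Int)) (seq2 : String) (out : List (Int × List (Int × Int))) : Decidable (Spec_get_seeds ktup index_table seq2 out) := by unfold Spec_get_seeds; infer_instance

-- ===== CLAIM (what is proved, stated in full; the proofs are below) =====
def Claim_equal_get_seeds : Prop := ∀ (ktup : Int) (index_table : List (String × List Int)) (seq2 : String), Dom_get_seeds ktup index_table seq2 → Pre_get_seeds ktup index_table seq2 → Spec_get_seeds ktup index_table seq2 (get_seeds ktup index_table seq2)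

-- ===== LEMMAS AND PROOFS =====

-- the windows A scans
def pvWins (ktup : Int) (seq2 : String) : List Int :=
  PySem.List.pyRange 0 (PySem.Str.len seq2 - ktup + 1) 1

-- the hit list in window order: one (i, positions) record per matching window
def pvTarget (ktup : Int) (index_table : List (String × List Int)) (seq2 : String) : List (Int × List Int) :=
  (pvWins ktup seq2).flatMap (fun i =>
    match (PySem.Dict.mk index_table).get? (PySem.Str.slice seq2 (some i) (some (i + ktup))) with
    | some ps => [(i, ps)]
    | none => [])

-- the window slice has length ktup
theorem pvSliceLen (ktup i : Int) (seq2 : String) (hk : 0 ≤ ktup) (hi : 0 ≤ i)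
    (hub : i + ktup ≤ PySem.Str.len seq2) :
    PySem.Str.len (PySem.Str.slice seq2 (some i) (some (i + ktup))) = ktup := by
  rw [PySem.Str.len_eq, PySem.Str.toList_slice, PySem.Chars.slice_eq_listSlice,
    PySem.List.slice_toNat _ hi (by omega)]
  rw [PySem.Str.len_eq] at hub
  simp only [List.length_take, List.length_drop]
  omega

-- A's 'if diagonal in seeds: append else: new list' is exactly Dict.modify with default [].
theorem seeds_step_eq (seeds : PySem.Dict Int (List (Int × Int))) (dg : Int) (pr : Int × Int) :
    (match seeds.get? dg with
      | some l => seeds.insert dg (l ++ [pr])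
      | none   => seeds.insert dg [pr]) = seeds.modify dg [] (fun l => l ++ [pr]) := by
  unfold PySem.Dict.modify
  cases h : seeds.get? dg with
  | some l => rw [PySem.Dict.getD_of_get?_eq_some _ _ h]
  | none   => rw [PySem.Dict.getD_of_get?_eq_none _ _ h]; rfl

-- B's raw hit list is the flat list of per-word occurrence records
theorem pvHits_eq_flatMap (ktup : Int) (index_table : List (String × List Int)) (seq2 : String) :
    (PySem.Dict.mk index_table).items.foldl (fun acc wp =>
      if PySem.Str.len wp.1 == ktup then
        (pvWins ktup seq2).foldl (fun acc i =>
          if PySem.Str.slice seq2 (some i) (some (i + ktup)) == wp.1 then acc ++ [(i, wp.2)]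
          else acc) acc
      else acc) []
    = index_table.flatMap (fun wp =>
        if PySem.Str.len wp.1 == ktup then
          ((pvWins ktup seq2).filter (fun i => PySem.Str.slice seq2 (some i) (some (i + ktup)) == wp.1)).map
            (fun i => (i, wp.2))
        else []) := by
  rw [show (PySem.Dict.mk index_table).items = index_table from rfl]
  rw [PySem.List.foldl_congr_mem index_table _
    (fun acc wp =>
      acc ++ (if PySem.Str.len wp.1 == ktup then
          ((pvWins ktup seq2).filter (fun i => PySem.Str.slice seq2 (some i) (some (i + ktup)) == wp.1)).map
            (fun i => (i, wp.2))
        else []))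
    [] ?_]
  · rw [PySem.List.foldl_append_eq_flatMap]; simp
  · intro acc wp _
    by_cases h : (PySem.Str.len wp.1 == ktup) = true
    · simp only [h, if_true]
      rw [PySem.List.foldl_append_if]
    · simp only [h]
      simp

-- an element of the window-i record has first component i
theorem pvFst_of_mem (ktup : Int) (index_table : List (String × List Int)) (seq2 : String)
    (i : Int) (x : Int × List Int)
    (hx : x ∈ (match (PySem.Dict.mk index_table).get? (PySem.Str.slice seq2 (some i) (some (i + ktup))) with
      | some ps => [(i, ps)]
      | none => ([] : List (Int × List Int)))) : x.1 = i := by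
  cases h : (PySem.Dict.mk index_table).get? (PySem.Str.slice seq2 (some i) (some (i + ktup))) with
  | none => rw [h] at hx; simp at hx
  | some ps => rw [h] at hx; simp only [List.mem_singleton] at hx; rw [hx]

-- the window-order hit list is strictly increasing in the window position
theorem pvTarget_pairwise (ktup : Int) (index_table : List (String × List Int)) (seq2 : String) :
    (pvTarget ktup index_table seq2).Pairwise (fun a b => a.1 < b.1) := by
  rw [pvTarget, List.pairwise_flatMap]
  constructor
  · intro i _
    cases h : (PySem.Dict.mk index_table).get? (PySem.Str.slice seq2 (some i) (some (i + ktup))) <;> simp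
  · have hp : (pvWins ktup seq2).Pairwise (· < ·) := PySem.List.pairwise_lt_pyRange_one _ _
    refine hp.imp ?_
    intro i j hij x hx y hy
    rw [pvFst_of_mem ktup index_table seq2 i x hx, pvFst_of_mem ktup index_table seq2 j y hy]
    exact hij

-- B's sorted hit list is exactly the window-order hit list
theorem pvSorted_hits_eq (ktup : Int) (index_table : List (String × List Int)) (seq2 : String)
    (hk : 0 ≤ ktup) (hnd : (index_table.map Prod.fst).Nodup) :
    PySem.List.sorted
      (index_table.flatMap (fun wp =>
        if PySem.Str.len wp.1 == ktup then
          ((pvWins ktup seq2).filter (fun i => PySem.Str.slice seq2 (some i) (some (i + ktup)) == wp.1)).map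
            (fun i => (i, wp.2))
        else []))
      (fun h => h.1)
    = pvTarget ktup index_table seq2 := by
  have hkeys : (PySem.Dict.mk index_table).keys.Nodup := by
    rw [show (PySem.Dict.mk index_table).keys = index_table.map Prod.fst from rfl]; exact hnd
  have hwin : ∀ i ∈ pvWins ktup seq2, 0 ≤ i ∧ i + ktup ≤ PySem.Str.len seq2 := by
    intro i hi
    rw [pvWins, PySem.List.mem_pyRange_one] at hi
    omega
  have hlen : ∀ i ∈ pvWins ktup seq2,
      PySem.Str.len (PySem.Str.slice seq2 (some i) (some (i + ktup))) = ktup := by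
    intro i hi
    exact pvSliceLen ktup i seq2 hk (hwin i hi).1 (hwin i hi).2
  have hmem_g : ∀ (wp : String × List Int) (x : Int × List Int),
      (x ∈ (if PySem.Str.len wp.1 == ktup then
          ((pvWins ktup seq2).filter (fun i => PySem.Str.slice seq2 (some i) (some (i + ktup)) == wp.1)).map
            (fun i => (i, wp.2))
        else [])) ↔
      (PySem.Str.len wp.1 = ktup ∧ x.1 ∈ pvWins ktup seq2 ∧
        PySem.Str.slice seq2 (some x.1) (some (x.1 + ktup)) = wp.1 ∧ x.2 = wp.2) := by
    intro wp x
    split_ifs with hc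
    · simp only [beq_iff_eq] at hc
      simp only [List.mem_map, List.mem_filter, beq_iff_eq]
      constructor
      · rintro ⟨i, ⟨hiW, hsl⟩, rfl⟩
        exact ⟨hc, hiW, hsl, rfl⟩
      · rintro ⟨-, hiW, hsl, hx2⟩
        exact ⟨x.1, ⟨hiW, hsl⟩, by rw [← hx2]⟩
    · simp only [beq_iff_eq] at hc
      simp only [List.not_mem_nil, false_iff]
      rintro ⟨h1, -, -, -⟩
      exact hc h1
  have hmem_target : ∀ (x : Int × List Int), x ∈ pvTarget ktup index_table seq2 ↔
      (x.1 ∈ pvWins ktup seq2 ∧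
        (PySem.Dict.mk index_table).get? (PySem.Str.slice seq2 (some x.1) (some (x.1 + ktup))) = some x.2) := by
    intro x
    rw [pvTarget, List.mem_flatMap]
    constructor
    · rintro ⟨i, hiW, hx⟩
      have hfst := pvFst_of_mem ktup index_table seq2 i x hx
      subst hfst
      cases h : (PySem.Dict.mk index_table).get? (PySem.Str.slice seq2 (some x.1) (some (x.1 + ktup))) with
      | none => rw [h] at hx; simp at hx
      | some ps =>
        rw [h] at hx
        simp only [List.mem_singleton] at hx
        exact ⟨hiW, by rw [show x.2 = ps from congrArg Prod.snd hx]⟩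
    · rintro ⟨hiW, hx⟩
      refine ⟨x.1, hiW, ?_⟩
      rw [hx]
      simp
  apply PySem.List.sorted_eq_of_perm_of_pairwise_lt
  · have hnd_target : (pvTarget ktup index_table seq2).Nodup :=
      (pvTarget_pairwise ktup index_table seq2).imp
        (fun h heq => absurd (congrArg Prod.fst heq) (ne_of_lt h))
    have hnd_flat : (index_table.flatMap (fun wp =>
        if PySem.Str.len wp.1 == ktup then
          ((pvWins ktup seq2).filter (fun i => PySem.Str.slice seq2 (some i) (some (i + ktup)) == wp.1)).map
            (fun i => (i, wp.2))
        else [])).Nodup := by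
      rw [List.nodup_flatMap]
      constructor
      · intro wp _
        split_ifs
        · exact ((PySem.List.nodup_pyRange_one _ _).filter _).map
            (fun a b h => by simpa using congrArg Prod.fst h)
        · exact List.nodup_nil
      · have hp : index_table.Pairwise (fun a b => a.1 ≠ b.1) := List.pairwise_map.mp hnd
        refine hp.imp ?_
        intro a b hne x hxa hxb
        rw [hmem_g] at hxa hxb
        exact hne (hxa.2.2.1 ▸ hxb.2.2.1)
    rw [List.perm_ext_iff_of_nodup hnd_target hnd_flat]
    intro x
    rw [hmem_target, List.mem_flatMap]
    constructor
    · rintro ⟨hiW, hget⟩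
      refine ⟨(PySem.Str.slice seq2 (some x.1) (some (x.1 + ktup)), x.2),
        (PySem.Dict.get?_eq_some_iff_mem_items _ _ _ hkeys).mp hget, ?_⟩
      rw [hmem_g]
      exact ⟨hlen x.1 hiW, hiW, rfl, rfl⟩
    · rintro ⟨wp, hwpmem, hx⟩
      rw [hmem_g] at hx
      obtain ⟨hlenw, hiW, hsl, hx2⟩ := hx
      refine ⟨hiW, ?_⟩
      rw [hsl, hx2]
      exact (PySem.Dict.get?_eq_some_iff_mem_items _ _ _ hkeys).mpr hwpmem
  · exact pvTarget_pairwise ktup index_table seq2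

theorem get_seeds_eq (ktup : Int) (index_table : List (String × List Int)) (seq2 : String)
    (hk : 0 ≤ ktup) (hnd : (index_table.map Prod.fst).Nodup) :
    get_seeds ktup index_table seq2 = get_seeds_alt ktup index_table seq2 := by
  show (List.foldl
      (fun seeds li =>
        match (PySem.Dict.mk index_table).get? (PySem.Str.slice seq2 (some li) (some (li + ktup))) with
        | some ps =>
            List.foldl (fun seeds p =>
              match seeds.get? (p - li) with
              | some l => seeds.insert (p - li) (l ++ [(p, li)])
              | none   => seeds.insert (p - li) [(p, li)]) seeds ps
        | none => seeds)
      (PySem.Dict.empty)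
      (pvWins ktup seq2)).items
    = ((PySem.List.sorted
        ((PySem.Dict.mk index_table).items.foldl (fun acc wp =>
          if PySem.Str.len wp.1 == ktup then
            (pvWins ktup seq2).foldl (fun acc i =>
              if PySem.Str.slice seq2 (some i) (some (i + ktup)) == wp.1 then acc ++ [(i, wp.2)]
              else acc) acc
          else acc) [])
        (fun h => h.1)).foldl (fun d h =>
          h.2.foldl (fun d p => d.modify (p - h.1) [] (fun l => l ++ [(p, h.1)])) d)
       (PySem.Dict.empty : PySem.Dict Int (List (Int × Int)))).items
  rw [pvHits_eq_flatMap, pvSorted_hits_eq ktup index_table seq2 hk hnd]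
  rw [pvTarget, List.foldl_flatMap]
  congr 1
  apply PySem.List.foldl_congr_mem
  intro acc li _
  cases h : (PySem.Dict.mk index_table).get? (PySem.Str.slice seq2 (some li) (some (li + ktup))) with
  | none => simp
  | some ps =>
    simp only [List.foldl_cons, List.foldl_nil]
    apply PySem.List.foldl_congr_mem
    intro acc' p _
    exact seeds_step_eq acc' (p - li) (p, li)

-- ===== VERDICT (by name: the statement is the Claim_ definition above) =====
theorem get_seeds_spec : Claim_equal_get_seeds := by
  intro ktup index_table seq2 _ hpre
  unfold Spec_get_seeds
  exact get_seeds_eq ktup index_table seq2 hpre.1 hpre.2
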